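-- pv_equiv track=rewrite | github.com/justt1n/turbo-potato | backend/app/domain/ingestion/service.py | guess_jar
-- ===== SOURCE A (Python) =====
-- def guess_jar(raw: str) -> str:
--     lowered = raw.lower()
--     if "qua" in lowered or "dam cuoi" in lowered:
--         return "ChoDi"
--     if "khoa hoc" in lowered or "sach" in lowered:
--         return "GiaoDuc"
--     if "vang" in lowered or "co phieu" in lowered:
--         return "TuDoTaiChinh"
--     if "xe" in lowered or "tiet kiem" in lowered:
--         return "TietKiem"
--     if any(token in lowered for token in ["an", "uong", "nha hang", "nhau"]):
--         return "HuongThu"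
--     return "ThietYeu"
-- ===== SOURCE B (Python) =====
-- KEYWORDS = [
--     ("qua", 0), ("dam cuoi", 0),
--     ("khoa hoc", 1), ("sach", 1),
--     ("vang", 2), ("co phieu", 2),
--     ("xe", 3), ("tiet kiem", 3),
--     ("an", 4), ("uong", 4), ("nha hang", 4), ("nhau", 4),
-- ]
-- JARS = ["ChoDi", "GiaoDuc", "TuDoTaiChinh", "TietKiem", "HuongThu", "ThietYeu"]
--
-- def guess_jar(raw: str) -> str:
--     # Single left-to-right scan over the text: at each position, note every
--     # keyword starting there and keep the minimum (best) priority seen.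
--     best = 5
--     s = raw.lower()
--     while s:
--         for kw, p in KEYWORDS:
--             if s.startswith(kw):
--                 best = min(best, p)
--         s = s[1:]
--     return JARS[best]
-- ===== Notes on version B (the rewrite author's own statement) =====
-- stated objective: alternative
-- what changed: Replaces A's rule-driven chain of whole-string substring searches with early return by a single text-driven left-to-right scan that at each position records every keyword starting there into a minimum-priority accumulator, mapping the final priority to a jar name at the end.
import Mathlib
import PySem

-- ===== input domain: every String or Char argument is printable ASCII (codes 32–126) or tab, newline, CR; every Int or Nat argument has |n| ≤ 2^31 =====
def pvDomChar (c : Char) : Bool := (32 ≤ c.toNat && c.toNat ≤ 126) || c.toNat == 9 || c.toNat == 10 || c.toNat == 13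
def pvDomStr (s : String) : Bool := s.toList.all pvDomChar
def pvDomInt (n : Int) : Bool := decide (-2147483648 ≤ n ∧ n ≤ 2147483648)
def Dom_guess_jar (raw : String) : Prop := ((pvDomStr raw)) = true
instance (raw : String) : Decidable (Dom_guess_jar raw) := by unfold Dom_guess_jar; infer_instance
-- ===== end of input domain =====

-- B replaces A's rule-driven substring searches with early return by a single text scan
-- keeping a minimum-priority accumulator; same results, no speed claim.

-- ===== PORT A =====
def guess_jar (raw : String) : String :=
  let lowered := PySem.Str.lower raw
  if PySem.Str.isIn "qua" lowered || PySem.Str.isIn "dam cuoi" lowered then "ChoDi"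
  else if PySem.Str.isIn "khoa hoc" lowered || PySem.Str.isIn "sach" lowered then "GiaoDuc"
  else if PySem.Str.isIn "vang" lowered || PySem.Str.isIn "co phieu" lowered then "TuDoTaiChinh"
  else if PySem.Str.isIn "xe" lowered || PySem.Str.isIn "tiet kiem" lowered then "TietKiem"
  else if ["an", "uong", "nha hang", "nhau"].any (fun token => PySem.Str.isIn token lowered) then "HuongThu"
  else "ThietYeu"

-- ===== PORT B =====
def jarKeywords : List (List Char × Nat) :=
  [("qua".toList, 0), ("dam cuoi".toList, 0),
   ("khoa hoc".toList, 1), ("sach".toList, 1),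
   ("vang".toList, 2), ("co phieu".toList, 2),
   ("xe".toList, 3), ("tiet kiem".toList, 3),
   ("an".toList, 4), ("uong".toList, 4), ("nha hang".toList, 4), ("nhau".toList, 4)]

def jarNames : List String :=
  ["ChoDi", "GiaoDuc", "TuDoTaiChinh", "TietKiem", "HuongThu", "ThietYeu"]

-- the `while s:` loop of Source B: consume the text one character at a time,
-- at each position min-ing in the priority of every keyword that starts there
def scanJar : List Char → Nat → Nat
  | [], best => best
  | c :: t, best =>
      scanJar t (jarKeywords.foldl
        (fun b kp => if PySem.Chars.startswith (c :: t) kp.1 then min b kp.2 else b) best)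

def guess_jar_alt (raw : String) : String :=
  -- JARS[best]: exact, since best ≤ 5 = jarNames.length - 1 always
  jarNames.getD (scanJar (PySem.Str.lower raw).toList 5) "ThietYeu"

-- ===== PRECONDITION & SPEC =====
def Spec_guess_jar (raw : String) (out : String) : Prop := out = guess_jar_alt raw
instance (raw : String) (out : String) : Decidable (Spec_guess_jar raw out) := by unfold Spec_guess_jar; infer_instance

-- ===== CLAIM (what is proved, stated in full; the proofs are below) =====
def Claim_equal_guess_jar : Prop := ∀ (raw : String), Dom_guess_jar raw → Spec_guess_jar raw (guess_jar raw)

-- ===== LEMMAS AND PROOFS =====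

-- the inner keyword pass, generic in the keyword test
def jmin (cond : List Char → Bool) (l : List (List Char × Nat)) (b : Nat) : Nat :=
  l.foldl (fun b kp => if cond kp.1 then min b kp.2 else b) b

lemma jmin_cons (cond : List Char → Bool) (kp : List Char × Nat) (l : List (List Char × Nat)) (b : Nat) :
    jmin cond (kp :: l) b = jmin cond l (if cond kp.1 then min b kp.2 else b) := rfl

lemma jmin_append (cond : List Char → Bool) (l₁ l₂ : List (List Char × Nat)) (b : Nat) :
    jmin cond (l₁ ++ l₂) b = jmin cond l₂ (jmin cond l₁ b) := by
  simp [jmin, List.foldl_append]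

lemma jmin_min (cond : List Char → Bool) (l : List (List Char × Nat)) (b p : Nat) :
    jmin cond l (min b p) = min (jmin cond l b) p := by
  induction l generalizing b with
  | nil => rfl
  | cons kp l ih =>
    rw [jmin_cons, jmin_cons]
    by_cases hc : cond kp.1 = true
    · rw [if_pos hc, if_pos hc, show min (min b p) kp.2 = min (min b kp.2) p from by omega, ih]
    · rw [if_neg hc, if_neg hc, ih]

lemma jmin_le (cond : List Char → Bool) (l : List (List Char × Nat)) (b : Nat) :
    jmin cond l b ≤ b := by
  have h := jmin_min cond l b b
  simp at h
  omega

-- per-keyword step: an occurrence in c :: t is an occurrence at the head or one in t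
lemma isIn_cons (kw : List Char) (c : Char) (t : List Char) :
    PySem.Chars.isIn kw (c :: t)
      = (PySem.Chars.startswith (c :: t) kw || PySem.Chars.isIn kw t) := by
  by_cases h : PySem.Chars.isIn kw (c :: t) = true
  · rw [h]
    rcases List.infix_cons_iff.mp ((PySem.Chars.isIn_iff_infix _ _).mp h) with hp | hi
    · rw [(PySem.Chars.startswith_iff _ _).mpr hp, Bool.true_or]
    · rw [(PySem.Chars.isIn_iff_infix _ _).mpr hi, Bool.or_true]
  · rw [Bool.eq_false_iff.mpr h]
    have hni := (PySem.Chars.isIn_eq_false_iff _ _).mp (Bool.eq_false_iff.mpr h)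
    have h1 : PySem.Chars.startswith (c :: t) kw = false := by
      cases h' : PySem.Chars.startswith (c :: t) kw
      · rfl
      · exact absurd (List.infix_cons_iff.mpr (Or.inl ((PySem.Chars.startswith_iff _ _).mp h'))) hni
    have h2 : PySem.Chars.isIn kw t = false := by
      cases h' : PySem.Chars.isIn kw t
      · rfl
      · exact absurd (List.infix_cons_iff.mpr (Or.inr ((PySem.Chars.isIn_iff_infix _ _).mp h'))) hni
    rw [h1, h2]
    rfl

-- splitting one text step: matching against c :: t = matching at the head ⊓ matching in t
lemma jmin_text_cons (c : Char) (t : List Char) (l : List (List Char × Nat)) (b : Nat) :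
    jmin (fun kw => PySem.Chars.isIn kw (c :: t)) l b
      = min (jmin (fun kw => PySem.Chars.startswith (c :: t) kw) l b)
            (jmin (fun kw => PySem.Chars.isIn kw t) l b) := by
  induction l generalizing b with
  | nil => simp [jmin]
  | cons kp l ih =>
    rw [jmin_cons, jmin_cons, jmin_cons, isIn_cons]
    cases h1 : PySem.Chars.startswith (c :: t) kp.1 <;>
      cases h2 : PySem.Chars.isIn kp.1 t <;>
        simp only [h1, h2, Bool.or_false, Bool.or_true, Bool.false_eq_true, if_true, if_false] <;>
        rw [ih] <;>
        first
        | rfl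
        | (rw [jmin_min, jmin_min]; omega)

-- the scan computes the min matched priority over the whole remaining text
lemma scanJar_eq (s : List Char) (best : Nat) :
    scanJar s best = jmin (fun kw => PySem.Chars.isIn kw s) jarKeywords best := by
  induction s generalizing best with
  | nil => rfl
  | cons c t ih =>
    show scanJar t (jmin (fun kw => PySem.Chars.startswith (c :: t) kw) jarKeywords best) = _
    rw [ih, jmin_text_cons]
    set x := jmin (fun kw => PySem.Chars.startswith (c :: t) kw) jarKeywords best with hx
    have hle : x ≤ best := jmin_le _ _ _
    rw [show x = min best x from by omega, jmin_min]
    omega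

-- two keywords of equal priority behave like A's 'k1 in s or k2 in s' test
lemma jmin_pair (cond : List Char → Bool) (k₁ k₂ : List Char) (p b : Nat) :
    jmin cond [(k₁, p), (k₂, p)] b = if cond k₁ || cond k₂ then min b p else b := by
  by_cases h1 : cond k₁ = true <;> by_cases h2 : cond k₂ = true <;>
    simp [jmin, h1, h2]

-- ===== VERDICT (by name: the statement is the Claim_ definition above) =====
theorem guess_jar_spec : Claim_equal_guess_jar := by
  intro raw _
  unfold Spec_guess_jar guess_jar guess_jar_alt
  simp only [PySem.Str.isIn_eq, List.any, Bool.or_false]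
  set L := (PySem.Str.lower raw).toList with hL
  rw [scanJar_eq]
  set cond := fun kw => PySem.Chars.isIn kw L with hcond
  rw [show jarKeywords
        = [("qua".toList, 0), ("dam cuoi".toList, 0)]
          ++ ([("khoa hoc".toList, 1), ("sach".toList, 1)]
          ++ ([("vang".toList, 2), ("co phieu".toList, 2)]
          ++ ([("xe".toList, 3), ("tiet kiem".toList, 3)]
          ++ ([("an".toList, 4), ("uong".toList, 4)]
          ++ [("nha hang".toList, 4), ("nhau".toList, 4)])))) from rfl]
  rw [jmin_append, jmin_append, jmin_append, jmin_append, jmin_append,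
    jmin_pair, jmin_pair, jmin_pair, jmin_pair, jmin_pair, jmin_pair]
  cases h0 : cond "qua".toList || cond "dam cuoi".toList <;>
  cases h1 : cond "khoa hoc".toList || cond "sach".toList <;>
  cases h2 : cond "vang".toList || cond "co phieu".toList <;>
  cases h3 : cond "xe".toList || cond "tiet kiem".toList <;>
  cases h4a : cond "an".toList || cond "uong".toList <;>
  cases h4b : cond "nha hang".toList || cond "nhau".toList <;>
  simp_all [jarNames, Bool.or_eq_false_iff]
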